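-- pv_equiv track=rewrite | github.com/struggling-student/PythonExercises | Esami/2020-2021/Esame-5/esamePY/program.sol.py | trova_foglie
-- ===== SOURCE A (Python) =====
-- def trova_foglie(stringa):
--     if stringa == '' or len(set(stringa.lower())) == 1:
--         return { stringa }
--     else:
--         return { foglia
--                 for i in range(len(stringa)-1)
--                 if len(set(stringa[i:i+2].lower()))==2
--                 for foglia in trova_foglie(stringa[:i]+stringa[i+2:])
--                 }
-- ===== SOURCE B (Python) =====
-- def trova_foglie(stringa):
--     cache = {}
--
--     def go(s):
--         r = cache.get(s)
--         if r is not None: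
--             return r
--         if s == '' or len(set(s.lower())) == 1:
--             r = {s}
--         else:
--             low = s.lower()
--             r = set()
--             for i in range(len(s) - 1):
--                 if low[i] != low[i + 1]:
--                     r = r | go(s[:i] + s[i + 2:])
--         cache[s] = r
--         return r
--
--     return go(stringa)
-- ===== Notes on version B (the rewrite author's own statement) =====
-- stated objective: faster
-- what changed: B memoizes the recursion with a per-string cache and accumulates leaves by set union over index pairs with differing lowercased chars, so each distinct reachable substring is expanded once instead of exponentially many times.
import Mathlib
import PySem

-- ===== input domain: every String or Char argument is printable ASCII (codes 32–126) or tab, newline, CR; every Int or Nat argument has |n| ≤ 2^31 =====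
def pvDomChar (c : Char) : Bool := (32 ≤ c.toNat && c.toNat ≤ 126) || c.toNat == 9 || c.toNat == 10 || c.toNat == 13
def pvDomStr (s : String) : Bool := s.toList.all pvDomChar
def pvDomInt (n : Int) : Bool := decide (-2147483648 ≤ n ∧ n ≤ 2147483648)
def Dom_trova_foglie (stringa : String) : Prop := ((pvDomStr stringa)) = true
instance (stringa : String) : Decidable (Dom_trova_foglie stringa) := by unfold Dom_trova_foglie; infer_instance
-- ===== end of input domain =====

-- B memoizes the recursion with a per-string cache (union of cached child results); A recomputes subproblems exponentially often.
-- The equivalence below is about the returned Python SET, modelled as the first-occurrence-ordered list of distinct leaves.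

-- ===== PORT A =====
-- termination helper: the child string stringa[:i]+stringa[i+2:] is 2 shorter
theorem pv_child_len {cs : List Char} {i : Int} (h0 : 0 ≤ i) (h1 : i < (cs.length : Int) - 1) :
    (PySem.List.slice cs none (some i) ++ PySem.List.slice cs (some (i + 2)) none).length < cs.length := by
  rw [PySem.List.slice_to cs h0, PySem.List.slice_from cs (by omega)]
  simp only [List.length_append, List.length_take, List.length_drop]
  omega

def trova_foglie_core (cs : List Char) : List String :=
  if cs = [] ∨ (PySem.Set.ofList (PySem.Chars.lower cs)).length = 1 then
    [String.ofList cs]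
  else
    PySem.Set.ofList
      (((PySem.List.pyRange 0 ((cs.length : Int) - 1) 1).attach).flatMap
        (fun iw =>
          if (PySem.Set.ofList (PySem.Chars.lower (PySem.List.slice cs (some iw.1) (some (iw.1 + 2))))).length = 2 then
            trova_foglie_core (PySem.List.slice cs none (some iw.1) ++ PySem.List.slice cs (some (iw.1 + 2)) none)
          else []))
termination_by cs.length
decreasing_by
  have h := PySem.List.mem_pyRange_one.mp iw.2
  exact pv_child_len h.1 h.2

def trova_foglie (stringa : String) : List String := trova_foglie_core stringa.toList

-- ===== PORT B =====
-- go(s): look the string up in the cache; else base case {s}; else union go(child) over indices i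
-- with low[i] != low[i+1]; store the result in the cache before returning.
def trova_foglie_go (cs : List Char) (cache : PySem.Dict String (List String)) :
    List String × PySem.Dict String (List String) :=
  match cache.get? (String.ofList cs) with
  | some r => (r, cache)
  | none =>
    let r :=
      if cs = [] ∨ (PySem.Set.ofList (PySem.Chars.lower cs)).length = 1 then
        ([String.ofList cs], cache)
      else
        let low := PySem.Chars.lower cs
        ((PySem.List.pyRange 0 ((cs.length : Int) - 1) 1).attach).foldl
          (fun (acc : List String × PySem.Dict String (List String)) iw =>
            if PySem.List.pyGetD low iw.1 ' ' ≠ PySem.List.pyGetD low (iw.1 + 1) ' ' then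
              let pr := trova_foglie_go
                (PySem.List.slice cs none (some iw.1) ++ PySem.List.slice cs (some (iw.1 + 2)) none) acc.2
              (PySem.Set.union acc.1 pr.1, pr.2)
            else acc)
          (PySem.Set.empty, cache)
    (r.1, r.2.insert (String.ofList cs) r.1)
termination_by cs.length
decreasing_by
  have h := PySem.List.mem_pyRange_one.mp iw.2
  exact pv_child_len h.1 h.2

def trova_foglie_alt (stringa : String) : List String :=
  (trova_foglie_go stringa.toList PySem.Dict.empty).1

-- ===== PRECONDITION & SPEC =====
def Spec_trova_foglie (stringa : String) (out : List String) : Prop := out = trova_foglie_alt stringa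
instance (stringa : String) (out : List String) : Decidable (Spec_trova_foglie stringa out) := by unfold Spec_trova_foglie; infer_instance

-- ===== CLAIM (what is proved, stated in full; the proofs are below) =====
def Claim_equal_trova_foglie : Prop := ∀ (stringa : String), Dom_trova_foglie stringa → Spec_trova_foglie stringa (trova_foglie stringa)

-- ===== LEMMAS AND PROOFS =====
theorem pv_pair (x y : Char) : (PySem.Set.ofList [x,y]).length = 2 ↔ x ≠ y := by
  by_cases h : x = y <;> simp [PySem.Set.ofList, PySem.Set.add, h, eq_comm, PySem.Set.contains]

theorem pv_slice_pair (cs : List Char) {i : Int} (h0 : 0 ≤ i) (h1 : i < (cs.length:Int) - 1) :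
    PySem.List.slice cs (some i) (some (i+2)) =
      [cs[i.toNat]'(by omega), cs[i.toNat+1]'(by omega)] := by
  rw [PySem.List.slice_toNat cs h0 (by omega)]
  have h2 : (i+2).toNat - i.toNat = 2 := by omega
  have d1 : List.drop i.toNat cs = cs[i.toNat]'(by omega) :: List.drop (i.toNat+1) cs :=
    List.drop_eq_getElem_cons (by omega)
  have d2 : List.drop (i.toNat+1) cs = cs[i.toNat+1]'(by omega) :: List.drop (i.toNat+2) cs :=
    List.drop_eq_getElem_cons (by omega)
  rw [h2, d1, d2]
  rfl

theorem pv_lower_map (l : List Char) : PySem.Chars.lower l = l.map PySem.Chars.lowerChar := rfl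

theorem pv_cond (cs : List Char) {i : Int} (h0 : 0 ≤ i) (h1 : i < (cs.length:Int) - 1) :
    ((PySem.Set.ofList (PySem.Chars.lower (PySem.List.slice cs (some i) (some (i+2))))).length = 2)
    ↔ ¬(PySem.List.pyGetD (PySem.Chars.lower cs) i ' ' = PySem.List.pyGetD (PySem.Chars.lower cs) (i+1) ' ') := by
  have hl : (PySem.Chars.lower cs).length = cs.length := by rw [pv_lower_map]; simp
  rw [pv_slice_pair cs h0 h1, pv_lower_map,
      PySem.List.pyGetD_eq_getElem _ _ h0 (by rw [hl]; omega),
      PySem.List.pyGetD_eq_getElem _ _ (by omega) (by rw [hl]; omega)]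
  have h3 : (i+1).toNat = i.toNat + 1 := by omega
  simp only [List.map_cons, List.map_nil, pv_lower_map, List.getElem_map, h3, pv_pair]

theorem pv_foldl_union {α : Type} (g : α → List String) (l : List α) (ys : List String) :
    l.foldl (fun acc x => PySem.Set.union acc (g x)) (PySem.Set.ofList ys)
      = PySem.Set.ofList (ys ++ l.flatMap g) := by
  induction l generalizing ys with
  | nil => simp
  | cons x t ih =>
    simp only [List.foldl_cons, List.flatMap_cons]
    rw [show PySem.Set.union (PySem.Set.ofList ys) (g x)
          = PySem.Set.update (PySem.Set.ofList ys) (g x) from rfl,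
        ← PySem.Set.ofList_append, ih, List.append_assoc]

def pvGood (c : PySem.Dict String (List String)) : Prop :=
  ∀ k v, c.get? k = some v → v = trova_foglie_core k.toList

theorem pvGood_insert {c : PySem.Dict String (List String)} (hc : pvGood c)
    (cs : List Char) {v : List String} (hv : v = trova_foglie_core cs) :
    pvGood (c.insert (String.ofList cs) v) := by
  intro k' v' h
  by_cases hk : k' = String.ofList cs
  · subst hk
    rw [PySem.Dict.get?_insert_self] at h
    cases h
    simpa [String.toList_ofList] using hv
  · rw [PySem.Dict.get?_insert_of_ne _ _ hk] at h
    exact hc _ _ h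

theorem pv_fold_thread (cs : List Char)
    (IH : ∀ ds : List Char, ds.length < cs.length → ∀ c, pvGood c →
      (trova_foglie_go ds c).1 = trova_foglie_core ds ∧ pvGood (trova_foglie_go ds c).2)
    (l : List {i : Int // i ∈ PySem.List.pyRange 0 ((cs.length:Int)-1) 1})
    (acc : List String) (c : PySem.Dict String (List String)) (hc : pvGood c) :
    (l.foldl (fun (acc : List String × PySem.Dict String (List String)) iw =>
        if PySem.List.pyGetD (PySem.Chars.lower cs) iw.1 ' ' ≠ PySem.List.pyGetD (PySem.Chars.lower cs) (iw.1 + 1) ' ' then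
          let pr := trova_foglie_go
            (PySem.List.slice cs none (some iw.1) ++ PySem.List.slice cs (some (iw.1 + 2)) none) acc.2
          (PySem.Set.union acc.1 pr.1, pr.2)
        else acc) (acc, c)).1
      = l.foldl (fun acc iw =>
          PySem.Set.union acc
            (if PySem.List.pyGetD (PySem.Chars.lower cs) iw.1 ' ' ≠ PySem.List.pyGetD (PySem.Chars.lower cs) (iw.1 + 1) ' ' then
              trova_foglie_core (PySem.List.slice cs none (some iw.1) ++ PySem.List.slice cs (some (iw.1 + 2)) none)
            else [])) acc
    ∧ pvGood (l.foldl (fun (acc : List String × PySem.Dict String (List String)) iw =>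
        if PySem.List.pyGetD (PySem.Chars.lower cs) iw.1 ' ' ≠ PySem.List.pyGetD (PySem.Chars.lower cs) (iw.1 + 1) ' ' then
          let pr := trova_foglie_go
            (PySem.List.slice cs none (some iw.1) ++ PySem.List.slice cs (some (iw.1 + 2)) none) acc.2
          (PySem.Set.union acc.1 pr.1, pr.2)
        else acc) (acc, c)).2 := by
  induction l generalizing acc c with
  | nil => exact ⟨rfl, hc⟩
  | cons x t ih =>
    simp only [List.foldl_cons]
    by_cases hcond : PySem.List.pyGetD (PySem.Chars.lower cs) x.1 ' ' ≠ PySem.List.pyGetD (PySem.Chars.lower cs) (x.1 + 1) ' '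
    · have hb := PySem.List.mem_pyRange_one.mp x.2
      have hchild := pv_child_len hb.1 hb.2
      have hgo := IH _ hchild c hc
      simp only [if_pos hcond]
      rw [hgo.1]
      exact ih _ _ hgo.2
    · simp only [if_neg hcond]
      have hupd : PySem.Set.union acc ([] : List String) = acc := rfl
      rw [hupd]
      exact ih acc c hc

theorem pv_go_correct (n : Nat) : ∀ cs : List Char, cs.length ≤ n → ∀ cache, pvGood cache →
    (trova_foglie_go cs cache).1 = trova_foglie_core cs ∧ pvGood (trova_foglie_go cs cache).2 := by
  induction n using Nat.strong_induction_on with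
  | _ n ih =>
    intro cs hlen cache hc
    rw [trova_foglie_go]
    cases hget : cache.get? (String.ofList cs) with
    | some r =>
      refine ⟨?_, hc⟩
      have := hc _ _ hget
      simpa [String.toList_ofList] using this
    | none =>
      by_cases hbase : cs = [] ∨ (PySem.Set.ofList (PySem.Chars.lower cs)).length = 1
      · simp only [if_pos hbase]
        have hv : [String.ofList cs] = trova_foglie_core cs := by
          rw [trova_foglie_core]; simp [hbase]
        exact ⟨hv, pvGood_insert hc cs hv⟩
      · simp only [if_neg hbase]
        have hn : 1 ≤ cs.length := by
          rcases cs with _ | ⟨a, t⟩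
          · exact absurd (Or.inl rfl) hbase
          · simp
        have IH' : ∀ ds : List Char, ds.length < cs.length → ∀ c, pvGood c →
            (trova_foglie_go ds c).1 = trova_foglie_core ds ∧ pvGood (trova_foglie_go ds c).2 := by
          intro ds hd c hgc
          exact ih (n - 1) (by omega) ds (by omega) c hgc
        have hthread := pv_fold_thread cs IH'
          ((PySem.List.pyRange 0 ((cs.length:Int)-1) 1).attach) PySem.Set.empty cache hc
        have hpure := pv_foldl_union
          (fun (iw : {i : Int // i ∈ PySem.List.pyRange 0 ((cs.length:Int)-1) 1}) =>
            if PySem.List.pyGetD (PySem.Chars.lower cs) iw.1 ' ' ≠ PySem.List.pyGetD (PySem.Chars.lower cs) (iw.1 + 1) ' ' then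
              trova_foglie_core (PySem.List.slice cs none (some iw.1) ++ PySem.List.slice cs (some (iw.1 + 2)) none)
            else [])
          ((PySem.List.pyRange 0 ((cs.length:Int)-1) 1).attach) []
        have hcongr : ((PySem.List.pyRange 0 ((cs.length:Int)-1) 1).attach).flatMap
            (fun (iw : {i : Int // i ∈ PySem.List.pyRange 0 ((cs.length:Int)-1) 1}) =>
              if PySem.List.pyGetD (PySem.Chars.lower cs) iw.1 ' ' ≠ PySem.List.pyGetD (PySem.Chars.lower cs) (iw.1 + 1) ' ' then
                trova_foglie_core (PySem.List.slice cs none (some iw.1) ++ PySem.List.slice cs (some (iw.1 + 2)) none)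
              else [])
          = ((PySem.List.pyRange 0 ((cs.length:Int)-1) 1).attach).flatMap
            (fun iw =>
              if (PySem.Set.ofList (PySem.Chars.lower (PySem.List.slice cs (some iw.1) (some (iw.1 + 2))))).length = 2 then
                trova_foglie_core (PySem.List.slice cs none (some iw.1) ++ PySem.List.slice cs (some (iw.1 + 2)) none)
              else []) := by
          refine List.flatMap_congr ?_
          intro iw _
          have hb := PySem.List.mem_pyRange_one.mp iw.2
          have hiff := pv_cond cs hb.1 hb.2
          by_cases hcond : (PySem.Set.ofList (PySem.Chars.lower (PySem.List.slice cs (some iw.1) (some (iw.1 + 2))))).length = 2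
          · rw [if_pos (hiff.mp hcond), if_pos hcond]
          · rw [if_neg (fun hh => hcond (hiff.mpr hh)), if_neg hcond]
        have hval : ((((PySem.List.pyRange 0 ((cs.length:Int)-1) 1).attach).foldl
            (fun (acc : List String × PySem.Dict String (List String)) iw =>
              if PySem.List.pyGetD (PySem.Chars.lower cs) iw.1 ' ' ≠ PySem.List.pyGetD (PySem.Chars.lower cs) (iw.1 + 1) ' ' then
                let pr := trova_foglie_go
                  (PySem.List.slice cs none (some iw.1) ++ PySem.List.slice cs (some (iw.1 + 2)) none) acc.2
                (PySem.Set.union acc.1 pr.1, pr.2)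
              else acc) (PySem.Set.empty, cache)).1)
            = trova_foglie_core cs := by
          rw [hthread.1,
              show (PySem.Set.empty : List String) = PySem.Set.ofList [] from rfl, hpure]
          simp only [List.nil_append]
          rw [hcongr]
          rw [trova_foglie_core]
          simp only [if_neg hbase]
        exact ⟨hval, pvGood_insert hthread.2 cs hval⟩

theorem pvGood_empty : pvGood PySem.Dict.empty := by
  intro k v h
  simp [PySem.Dict.empty, PySem.Dict.get?] at h

theorem pv_main (stringa : String) : trova_foglie stringa = trova_foglie_alt stringa := by
  unfold trova_foglie trova_foglie_alt
  exact (pv_go_correct stringa.toList.length stringa.toList le_rfl PySem.Dict.empty pvGood_empty).1.symm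

-- ===== VERDICT (by name: the statement is the Claim_ definition above) =====
theorem trova_foglie_spec : Claim_equal_trova_foglie := by
  intro stringa _
  exact pv_main stringa
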